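-- pv_equiv track=rewrite | github.com/mich-chen/code-challenges | longest-duplicate-path/longest_duplicate_path.py | longestDuplicatePath
-- ===== SOURCE A (Python) =====
-- def longestDuplicatePath(grid):
--
--     rows = len(grid)
--     cols = len(grid[0])
--
--     longest = 0
--     visited = set()
--     target = grid[0][0]
--
--     def dfs(row, col, target):
--         if row < 0 or row >= rows or col < 0 or col >= cols or (row, col) in visited or grid[row][col] != target:
--             return 0
--
--         visited.add((row, col))
--         bottom = dfs(row + 1, col, target)
--         top = dfs(row - 1, col, target)
--         right = dfs(row, col + 1, target)
--         left = dfs(row, col - 1, target)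
--
--         return 1 + (bottom + top + left + right)
--
--     for row in range(rows):
--         for col in range(cols):
--             target = grid[row][col]
--             current = dfs(row,col, target)
--             longest = max(longest, current)
--
--     return longest
-- ===== SOURCE B (Python) =====
-- def longestDuplicatePath(grid):
--     rows = len(grid)
--     cols = len(grid[0])
--     longest = 0
--     visited = set()
--     for row in range(rows):
--         for col in range(cols):
--             target = grid[row][col]
--             stack = [(row, col)]
--             count = 0
--             while stack:
--                 r, c = stack.pop()
--                 if 0 <= r < rows and 0 <= c < cols and (r, c) not in visited and grid[r][c] == target:
--                     visited.add((r, c))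
--                     count += 1
--                     stack.extend([(r, c - 1), (r, c + 1), (r - 1, c), (r + 1, c)])
--             longest = max(longest, count)
--     return longest
-- ===== Notes on version B (the rewrite author's own statement) =====
-- stated objective: alternative
-- what changed: The per-cell recursive DFS (four recursive calls sharing a mutated visited set) is replaced by an iterative flood fill driven by an explicit stack, so no recursion is used; Pre_ excludes the inputs on which A raises IndexError (empty grid, empty first row, or a row shorter than the first).
import Mathlib
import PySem

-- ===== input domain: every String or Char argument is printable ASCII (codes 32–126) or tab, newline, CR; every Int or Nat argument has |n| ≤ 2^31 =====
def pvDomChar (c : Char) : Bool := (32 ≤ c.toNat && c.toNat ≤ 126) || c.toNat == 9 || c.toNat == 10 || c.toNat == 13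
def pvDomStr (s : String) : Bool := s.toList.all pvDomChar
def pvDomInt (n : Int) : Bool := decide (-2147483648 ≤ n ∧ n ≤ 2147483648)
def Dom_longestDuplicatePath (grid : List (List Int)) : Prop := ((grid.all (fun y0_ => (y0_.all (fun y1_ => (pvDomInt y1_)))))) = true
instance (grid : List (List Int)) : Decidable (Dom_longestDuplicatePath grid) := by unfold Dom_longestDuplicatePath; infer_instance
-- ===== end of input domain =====

-- B replaces A's recursive DFS by an iterative flood fill with an explicit stack (same
-- asymptotic cost; avoids Python's recursion depth limit as a side benefit).

-- ===== PORT A =====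
-- Shared accessor: grid[r][c]. Both Pythons evaluate it only when 0 ≤ r < rows and
-- 0 ≤ c < cols ≤ len(grid[r]) (guaranteed by Pre_), where the defaults never fire, so it is exact there.
def pvAt (grid : List (List Int)) (r c : Int) : Int :=
  PySem.List.pyGetD (PySem.List.pyGetD grid r []) c 0

-- Row-major list of all (row, col) pairs: the nested 'for row in range(rows): for col in range(cols)'.
def pvIdx (rows cols : Int) : List (Int × Int) :=
  (PySem.List.pyRange 0 rows 1).flatMap (fun r => (PySem.List.pyRange 0 cols 1).map (fun c => (r, c)))

-- One child visit: run dfs on a neighbour from the accumulated (visited, count) state.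
def pvStep (dfs : Int → Int → List (Int × Int) → List (Int × Int) × Int) :
    (List (Int × Int) × Int) → (Int × Int) → (List (Int × Int) × Int) :=
  fun acc q => let d := dfs q.1 q.2 acc.1; (d.1, acc.2 + d.2)

-- A's dfs: guard in A's order, then the four recursive calls bottom/top/right/left threading
-- the shared visited set (a mutable Python set → threaded PySem.Set); the thread is written
-- as a fold over the four neighbours in that order, and integer addition is commutative, so
-- 1 + res.2 is Python's 1 + (bottom + top + left + right). Python bounds the recursion only
-- by the marking of visited cells; here a fuel counter makes it structural — the initial
-- fuel (one more than the number of cells) is proved sufficient below (dfsA_fuel_irrel).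
def dfsA (grid : List (List Int)) (rows cols target : Int) :
    Nat → Int → Int → List (Int × Int) → List (Int × Int) × Int
  | 0, _, _, V => (V, 0)
  | Nat.succ fuel, r, c, V =>
    if r < 0 ∨ r ≥ rows ∨ c < 0 ∨ c ≥ cols ∨ (r, c) ∈ V ∨ pvAt grid r c ≠ target then
      (V, 0)
    else
      let res := [(r + 1, c), (r - 1, c), (r, c + 1), (r, c - 1)].foldl
        (pvStep (dfsA grid rows cols target fuel)) (PySem.Set.add V (r, c), 0)
      (res.1, 1 + res.2)

def longestDuplicatePath (grid : List (List Int)) : Int :=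
  let rows : Int := grid.length
  let cols : Int := (PySem.List.pyGetD grid 0 []).length    -- len(grid[0]); Pre_ makes grid ≠ []
  ((pvIdx rows cols).foldl
    (fun st p =>
      let target := pvAt grid p.1 p.2
      let d := dfsA grid rows cols target ((pvIdx rows cols).length + 1) p.1 p.2 st.1
      (d.1, max st.2 d.2))
    (([] : List (Int × Int)), 0)).2

-- ===== PORT B =====
-- Termination measure for B's while loop: number of in-bounds cells not yet visited.
def pvMu (rows cols : Int) (V : List (Int × Int)) : Nat :=
  ((pvIdx rows cols).filter (fun p => p ∉ V)).length

theorem pv_filter_imp_sublist {α : Type} {l : List α} {p q : α → Bool}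
    (himp : ∀ x, q x = true → p x = true) : List.Sublist (l.filter q) (l.filter p) := by
  have := (l.filter_sublist (p := q)).filter p
  rw [List.filter_filter] at this
  have heq : (l.filter fun a => p a && q a) = l.filter q := by
    apply List.filter_congr; intro a _
    cases hqa : q a
    · simp
    · simp [himp a hqa]
  rwa [heq] at this

theorem pv_filter_strict {α : Type} {l : List α} {p q : α → Bool} (himp : ∀ x, q x = true → p x = true)
    {x : α} (hx : x ∈ l) (hpx : p x = true) (hqx : ¬ q x = true) :
    (l.filter q).length < (l.filter p).length := by
  have hs := pv_filter_imp_sublist (l := l) himp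
  refine Nat.lt_of_le_of_ne hs.length_le ?_
  intro hlen
  have : l.filter q = l.filter p := hs.eq_of_length hlen
  have hxq : x ∈ l.filter q := this ▸ (List.mem_filter.mpr ⟨hx, hpx⟩)
  exact hqx (List.mem_filter.mp hxq).2

theorem pv_mem_idx {rows cols : Int} {p : Int × Int}
    (h1 : 0 ≤ p.1) (h2 : p.1 < rows) (h3 : 0 ≤ p.2) (h4 : p.2 < cols) : p ∈ pvIdx rows cols := by
  obtain ⟨a, b⟩ := p
  simp only [pvIdx, List.mem_flatMap, List.mem_map, PySem.List.mem_pyRange_one]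
  exact ⟨a, by omega, b, by omega, rfl⟩

-- Visiting one new in-bounds cell strictly shrinks the measure (B's termination).
theorem pvMu_lt (rows cols : Int) (V W : List (Int × Int)) (p : Int × Int)
    (hVW : ∀ x ∈ V, x ∈ W) (hpW : p ∈ W) (hpV : p ∉ V)
    (h1 : 0 ≤ p.1) (h2 : p.1 < rows) (h3 : 0 ≤ p.2) (h4 : p.2 < cols) :
    pvMu rows cols W < pvMu rows cols V := by
  apply pv_filter_strict (x := p)
  · intro x hx
    simp only [decide_eq_true_eq] at *
    intro hxV; exact hx (hVW x hxV)
  · exact pv_mem_idx h1 h2 h3 h4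
  · simpa using hpV
  · simpa using hpW

-- B's while loop over the explicit stack. The stack is stored top-first (Python pushes
-- [left, right, up, down] at the END and pops from the END, i.e. down is popped next —
-- here down/up/right/left are consed at the HEAD; exact same pop order).
def floodB (grid : List (List Int)) (rows cols target : Int) (stack : List (Int × Int))
    (V : List (Int × Int)) (count : Int) : List (Int × Int) × Int :=
  match stack with
  | [] => (V, count)
  | (r, c) :: rest =>
    if h : 0 ≤ r ∧ r < rows ∧ 0 ≤ c ∧ c < cols ∧ (r, c) ∉ V ∧ pvAt grid r c = target then
      floodB grid rows cols target ((r + 1, c) :: (r - 1, c) :: (r, c + 1) :: (r, c - 1) :: rest)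
        (PySem.Set.add V (r, c)) (count + 1)
    else floodB grid rows cols target rest V count
termination_by (pvMu rows cols V, stack.length)
decreasing_by
  · left
    exact pvMu_lt rows cols V _ (r, c) (fun x hx => (PySem.Set.mem_add _ _ _).mpr (Or.inl hx))
      ((PySem.Set.mem_add _ _ _).mpr (Or.inr rfl)) h.2.2.2.2.1 h.1 h.2.1 h.2.2.1 h.2.2.2.1
  · right
    simp

def longestDuplicatePath_alt (grid : List (List Int)) : Int :=
  let rows : Int := grid.length
  let cols : Int := (PySem.List.pyGetD grid 0 []).length    -- len(grid[0]); Pre_ makes grid ≠ []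
  ((pvIdx rows cols).foldl
    (fun st p =>
      let target := pvAt grid p.1 p.2
      let f := floodB grid rows cols target [p] st.1 0
      (f.1, max st.2 f.2))
    (([] : List (Int × Int)), 0)).2

-- ===== PRECONDITION & SPEC =====
-- Pre_ excludes exactly the inputs on which Python A raises IndexError: the empty grid
-- (grid[0]), an empty first row (A's initial 'target = grid[0][0]'), and ragged grids with
-- a row shorter than the first (grid[row][col] for col < cols). B also raises on all of
-- these except the empty-first-row case, where B would return 0.
def Pre_longestDuplicatePath (grid : List (List Int)) : Prop :=
  grid ≠ [] ∧ grid.headI ≠ [] ∧ ∀ row ∈ grid, grid.headI.length ≤ row.length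
instance (grid : List (List Int)) : Decidable (Pre_longestDuplicatePath grid) := by
  unfold Pre_longestDuplicatePath; infer_instance

def pvWitness_longestDuplicatePath : List (List Int) := [[1, 1], [2, 1]]

def Spec_longestDuplicatePath (grid : List (List Int)) (out : Int) : Prop := out = longestDuplicatePath_alt grid
instance (grid : List (List Int)) (out : Int) : Decidable (Spec_longestDuplicatePath grid out) := by unfold Spec_longestDuplicatePath; infer_instance

-- ===== CLAIM (what is proved, stated in full; the proofs are below) =====
def Claim_equal_longestDuplicatePath : Prop := ∀ (grid : List (List Int)), Dom_longestDuplicatePath grid → Pre_longestDuplicatePath grid → Spec_longestDuplicatePath grid (longestDuplicatePath grid)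

-- ===== LEMMAS AND PROOFS =====
theorem dfsA_stop (grid : List (List Int)) (rows cols target : Int) (fuel : Nat) (r c : Int)
    (V : List (Int × Int))
    (h : r < 0 ∨ r ≥ rows ∨ c < 0 ∨ c ≥ cols ∨ (r, c) ∈ V ∨ pvAt grid r c ≠ target) :
    dfsA grid rows cols target fuel r c V = (V, 0) := by
  cases fuel with
  | zero => rfl
  | succ fuel => rw [dfsA, if_pos h]

-- succ-step unfolding in projection form (escapes the 'let' in the body).
theorem dfsA_go (grid : List (List Int)) (rows cols target : Int) (fuel : Nat) (r c : Int)
    (V : List (Int × Int))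
    (h : ¬(r < 0 ∨ r ≥ rows ∨ c < 0 ∨ c ≥ cols ∨ (r, c) ∈ V ∨ pvAt grid r c ≠ target)) :
    dfsA grid rows cols target (fuel + 1) r c V =
      (([(r + 1, c), (r - 1, c), (r, c + 1), (r, c - 1)].foldl
          (pvStep (dfsA grid rows cols target fuel)) (PySem.Set.add V (r, c), 0)).1,
       1 + ([(r + 1, c), (r - 1, c), (r, c + 1), (r, c - 1)].foldl
          (pvStep (dfsA grid rows cols target fuel)) (PySem.Set.add V (r, c), 0)).2) := by
  rw [dfsA, if_neg h]

theorem pv_mem_dfsA (grid : List (List Int)) (rows cols target : Int) :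
    ∀ (fuel : Nat) (r c : Int) (V : List (Int × Int)) (x : Int × Int),
      x ∈ V → x ∈ (dfsA grid rows cols target fuel r c V).1 := by
  intro fuel
  induction fuel with
  | zero => intro r c V x hx; exact hx
  | succ fuel ih =>
    have aux : ∀ (l : List (Int × Int)) (st : List (Int × Int) × Int) (x : Int × Int),
        x ∈ st.1 → x ∈ (l.foldl (pvStep (dfsA grid rows cols target fuel)) st).1 := by
      intro l
      induction l with
      | nil => intro st x hx; exact hx
      | cons q t ihl =>
        intro st x hx
        rw [List.foldl_cons]
        exact ihl _ x (ih q.1 q.2 st.1 x hx)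
    intro r c V x hx
    by_cases h : r < 0 ∨ r ≥ rows ∨ c < 0 ∨ c ≥ cols ∨ (r, c) ∈ V ∨ pvAt grid r c ≠ target
    · rw [dfsA_stop grid rows cols target _ r c V h]; exact hx
    · rw [dfsA_go grid rows cols target fuel r c V h]
      exact aux _ _ x ((PySem.Set.mem_add _ _ _).mpr (Or.inl hx))

theorem pvMu_le_of_subset (rows cols : Int) {V W : List (Int × Int)}
    (h : ∀ x ∈ V, x ∈ W) : pvMu rows cols W ≤ pvMu rows cols V := by
  apply List.Sublist.length_le
  apply pv_filter_imp_sublist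
  intro x hx
  simp only [decide_eq_true_eq] at *
  intro hxV; exact hx (h x hxV)

theorem pvMu_dfsA_le (grid : List (List Int)) (rows cols target : Int) (fuel : Nat) (r c : Int)
    (V : List (Int × Int)) :
    pvMu rows cols (dfsA grid rows cols target fuel r c V).1 ≤ pvMu rows cols V :=
  pvMu_le_of_subset rows cols (fun x hx => pv_mem_dfsA grid rows cols target fuel r c V x hx)

theorem pvMu_add_lt (rows cols : Int) (V : List (Int × Int)) (r c : Int)
    (h1 : 0 ≤ r) (h2 : r < rows) (h3 : 0 ≤ c) (h4 : c < cols) (h5 : (r, c) ∉ V) :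
    pvMu rows cols (PySem.Set.add V (r, c)) < pvMu rows cols V :=
  pvMu_lt rows cols V _ (r, c) (fun x hx => (PySem.Set.mem_add _ _ _).mpr (Or.inl hx))
    ((PySem.Set.mem_add _ _ _).mpr (Or.inr rfl)) h5 h1 h2 h3 h4

theorem pvMu_bound (rows cols : Int) (V : List (Int × Int)) :
    pvMu rows cols V ≤ (pvIdx rows cols).length :=
  List.length_filter_le _ _

-- Fold-level congruence: two fuels agree on a fold as soon as they agree pointwise
-- above the measure, which only shrinks along the fold.
theorem pv_fold_irrel_aux (grid : List (List Int)) (rows cols target : Int) (f g : Nat)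
    (hfg : ∀ (r c : Int) (V : List (Int × Int)), pvMu rows cols V < f → pvMu rows cols V < g →
      dfsA grid rows cols target f r c V = dfsA grid rows cols target g r c V) :
    ∀ (l : List (Int × Int)) (st : List (Int × Int) × Int),
      pvMu rows cols st.1 < f → pvMu rows cols st.1 < g →
      l.foldl (pvStep (dfsA grid rows cols target f)) st =
        l.foldl (pvStep (dfsA grid rows cols target g)) st := by
  intro l
  induction l with
  | nil => intro st _ _; rfl
  | cons q t ihl =>
    intro st hf hgg
    rw [List.foldl_cons, List.foldl_cons]
    have e : pvStep (dfsA grid rows cols target f) st q =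
        pvStep (dfsA grid rows cols target g) st q := by
      unfold pvStep
      rw [hfg q.1 q.2 st.1 hf hgg]
    rw [e]
    apply ihl
    · exact lt_of_le_of_lt (pvMu_dfsA_le grid rows cols target g q.1 q.2 st.1) hf
    · exact lt_of_le_of_lt (pvMu_dfsA_le grid rows cols target g q.1 q.2 st.1) hgg

-- Enough fuel makes the result fuel-independent.
theorem dfsA_fuel_irrel (grid : List (List Int)) (rows cols target : Int) :
    ∀ (f₁ f₂ : Nat) (r c : Int) (V : List (Int × Int)),
      pvMu rows cols V < f₁ → pvMu rows cols V < f₂ →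
      dfsA grid rows cols target f₁ r c V = dfsA grid rows cols target f₂ r c V := by
  intro f₁
  induction f₁ with
  | zero => intro f₂ r c V h1 _; omega
  | succ f ih =>
    intro f₂ r c V h1 h2
    cases f₂ with
    | zero => omega
    | succ g =>
      by_cases hg : r < 0 ∨ r ≥ rows ∨ c < 0 ∨ c ≥ cols ∨ (r, c) ∈ V ∨ pvAt grid r c ≠ target
      · rw [dfsA_stop grid rows cols target _ r c V hg, dfsA_stop grid rows cols target _ r c V hg]
      · rw [dfsA_go grid rows cols target f r c V hg, dfsA_go grid rows cols target g r c V hg]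
        have hlt : pvMu rows cols (PySem.Set.add V (r, c)) < pvMu rows cols V := by
          push Not at hg
          exact pvMu_add_lt rows cols V r c (by omega) (by omega) (by omega) (by omega) hg.2.2.2.2.1
        have HA := pv_fold_irrel_aux grid rows cols target f g (fun r' c' V' hf' hg' => ih g r' c' V' hf' hg')
          [(r + 1, c), (r - 1, c), (r, c + 1), (r, c - 1)] (PySem.Set.add V (r, c), 0)
          (show pvMu rows cols (PySem.Set.add V (r, c)) < f by omega)
          (show pvMu rows cols (PySem.Set.add V (r, c)) < g by omega)
        rw [HA]

-- Threading the count through a fold only shifts the second component.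
theorem pv_fold_shift (dfs : Int → Int → List (Int × Int) → List (Int × Int) × Int) :
    ∀ (l : List (Int × Int)) (W : List (Int × Int)) (a : Int),
      l.foldl (pvStep dfs) (W, a) =
        ((l.foldl (pvStep dfs) (W, 0)).1, a + (l.foldl (pvStep dfs) (W, 0)).2) := by
  intro l
  induction l with
  | nil => intro W a; simp
  | cons q t ihl =>
    intro W a
    rw [List.foldl_cons, List.foldl_cons]
    rw [show pvStep dfs (W, a) q = ((dfs q.1 q.2 W).1, a + (dfs q.1 q.2 W).2) from rfl]
    rw [show pvStep dfs (W, 0) q = ((dfs q.1 q.2 W).1, 0 + (dfs q.1 q.2 W).2) from rfl]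
    rw [ihl, ihl (dfs q.1 q.2 W).1 (0 + (dfs q.1 q.2 W).2)]
    refine Prod.ext rfl ?_
    simp only []
    ring

theorem pvMu_pos (rows cols : Int) (V : List (Int × Int)) (r c : Int)
    (h1 : 0 ≤ r) (h2 : r < rows) (h3 : 0 ≤ c) (h4 : c < cols) (h5 : (r, c) ∉ V) :
    0 < pvMu rows cols V := by
  unfold pvMu
  have : (r, c) ∈ (pvIdx rows cols).filter (fun p => p ∉ V) :=
    List.mem_filter.mpr ⟨pv_mem_idx h1 h2 h3 h4, by simpa using h5⟩
  exact List.length_pos_of_mem this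

-- The heart of the proof: running B's stack machine equals folding A's (fully fuelled) dfs
-- over the stack entries in order (outer induction on the unvisited count, inner on the stack).
theorem flood_eq_fold (grid : List (List Int)) (rows cols target : Int) :
    ∀ (n : Nat) (s : List (Int × Int)) (V : List (Int × Int)) (count : Int),
      pvMu rows cols V ≤ n →
      floodB grid rows cols target s V count =
        s.foldl (pvStep (dfsA grid rows cols target ((pvIdx rows cols).length + 1))) (V, count) := by
  intro n
  induction n with
  | zero =>
    intro s
    induction s with
    | nil => intro V count _; simp [floodB]
    | cons p rest ih =>
      intro V count hmu
      obtain ⟨r, c⟩ := p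
      have hA : r < 0 ∨ r ≥ rows ∨ c < 0 ∨ c ≥ cols ∨ (r, c) ∈ V ∨ pvAt grid r c ≠ target := by
        by_contra hc
        push Not at hc
        have := pvMu_pos rows cols V r c (by omega) (by omega) (by omega) (by omega) hc.2.2.2.2.1
        omega
      have hguard : ¬ (0 ≤ r ∧ r < rows ∧ 0 ≤ c ∧ c < cols ∧ (r, c) ∉ V ∧ pvAt grid r c = target) := by
        intro hg
        rcases hA with h | h | h | h | h | h
        · omega
        · omega
        · omega
        · omega
        · exact hg.2.2.2.2.1 h
        · exact h hg.2.2.2.2.2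
      rw [floodB, dif_neg hguard, ih V count hmu, List.foldl_cons]
      congr 1
      unfold pvStep
      simp only [dfsA_stop grid rows cols target _ r c V hA]
      simp
  | succ n ihn =>
    intro s
    induction s with
    | nil => intro V count _; simp [floodB]
    | cons p rest ihs =>
      intro V count hmu
      obtain ⟨r, c⟩ := p
      by_cases hg : 0 ≤ r ∧ r < rows ∧ 0 ≤ c ∧ c < cols ∧ (r, c) ∉ V ∧ pvAt grid r c = target
      · have hA : ¬(r < 0 ∨ r ≥ rows ∨ c < 0 ∨ c ≥ cols ∨ (r, c) ∈ V ∨ pvAt grid r c ≠ target) := by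
          push Not
          exact ⟨by omega, by omega, by omega, by omega, hg.2.2.2.2.1, hg.2.2.2.2.2⟩
        have hlt : pvMu rows cols (PySem.Set.add V (r, c)) < pvMu rows cols V :=
          pvMu_add_lt rows cols V r c hg.1 hg.2.1 hg.2.2.1 hg.2.2.2.1 hg.2.2.2.2.1
        have hL : pvMu rows cols V ≤ (pvIdx rows cols).length := pvMu_bound rows cols V
        rw [floodB, dif_pos hg, ihn _ _ _ (by omega)]
        -- peel the four pushed neighbours on the left, the start cell on the right
        rw [List.foldl_cons (l := rest)]
        rw [show ((r + 1, c) :: (r - 1, c) :: (r, c + 1) :: (r, c - 1) :: rest).foldl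
              (pvStep (dfsA grid rows cols target ((pvIdx rows cols).length + 1))) (PySem.Set.add V (r, c), count + 1) =
            rest.foldl (pvStep (dfsA grid rows cols target ((pvIdx rows cols).length + 1)))
              ([(r + 1, c), (r - 1, c), (r, c + 1), (r, c - 1)].foldl
                (pvStep (dfsA grid rows cols target ((pvIdx rows cols).length + 1)))
                (PySem.Set.add V (r, c), count + 1)) from rfl]
        congr 1
        -- LHS: pull the count offset out of the four-neighbour fold
        rw [pv_fold_shift (dfsA grid rows cols target ((pvIdx rows cols).length + 1))
          [(r + 1, c), (r - 1, c), (r, c + 1), (r, c - 1)] (PySem.Set.add V (r, c)) (count + 1)]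
        -- RHS: the start step at full fuel, unfolded one level and lifted back to full fuel
        conv_rhs => rw [show pvStep (dfsA grid rows cols target ((pvIdx rows cols).length + 1)) (V, count) (r, c) =
          ((dfsA grid rows cols target ((pvIdx rows cols).length + 1) r c V).1,
           count + (dfsA grid rows cols target ((pvIdx rows cols).length + 1) r c V).2) from rfl]
        rw [dfsA_go grid rows cols target ((pvIdx rows cols).length) r c V hA]
        have HA := pv_fold_irrel_aux grid rows cols target ((pvIdx rows cols).length)
          ((pvIdx rows cols).length + 1)
          (fun r' c' V' hf' hg' => dfsA_fuel_irrel grid rows cols target _ _ r' c' V' hf' hg')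
          [(r + 1, c), (r - 1, c), (r, c + 1), (r, c - 1)] (PySem.Set.add V (r, c), 0)
          (show pvMu rows cols (PySem.Set.add V (r, c)) < (pvIdx rows cols).length by omega)
          (show pvMu rows cols (PySem.Set.add V (r, c)) < (pvIdx rows cols).length + 1 by omega)
        rw [HA]
        refine Prod.ext rfl ?_
        simp only []
        ring
      · have hA : r < 0 ∨ r ≥ rows ∨ c < 0 ∨ c ≥ cols ∨ (r, c) ∈ V ∨ pvAt grid r c ≠ target := by
          by_contra hc
          push Not at hc
          exact hg ⟨by omega, by omega, by omega, by omega, hc.2.2.2.2.1, hc.2.2.2.2.2⟩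
        rw [floodB, dif_neg hg, ihs V count hmu, List.foldl_cons]
        congr 1
        unfold pvStep
        simp only [dfsA_stop grid rows cols target _ r c V hA]
        simp

-- One flood fill from a single start equals one (fully fuelled) dfs call.
theorem flood_singleton (grid : List (List Int)) (rows cols target : Int) (p : Int × Int)
    (V : List (Int × Int)) :
    floodB grid rows cols target [p] V 0 =
      dfsA grid rows cols target ((pvIdx rows cols).length + 1) p.1 p.2 V := by
  rw [flood_eq_fold grid rows cols target (pvMu rows cols V) [p] V 0 (le_refl _)]
  simp [pvStep]

-- ===== VERDICT (by name: the statement is the Claim_ definition above) =====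
theorem longestDuplicatePath_spec : Claim_equal_longestDuplicatePath := by
  intro grid _ _
  unfold Spec_longestDuplicatePath longestDuplicatePath longestDuplicatePath_alt
  simp only [flood_singleton]
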